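-- pv_equiv track=rewrite | github.com/sosodennis/value-investment-agent | finance-agent-core/src/agents/fundamental/domain/report_semantics.py | infer_extension_type_from_extension
-- ===== SOURCE A (Python) =====
-- from collections.abc import Mapping
--
-- INDUSTRIAL_EXTENSION_KEYS: tuple[str, ...] = (
--     "inventory",
--     "accounts_receivable",
--     "cogs",
--     "rd_expense",
--     "sga_expense",
--     "selling_expense",
--     "ga_expense",
--     "capex",
-- )
--
-- FINANCIAL_SERVICES_EXTENSION_KEYS: tuple[str, ...] = (
--     "loans_and_leases",
--     "deposits",
--     "allowance_for_credit_losses",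
--     "interest_income",
--     "interest_expense",
--     "provision_for_loan_losses",
--     "risk_weighted_assets",
--     "tier1_capital_ratio",
-- )
--
-- REAL_ESTATE_EXTENSION_KEYS: tuple[str, ...] = (
--     "real_estate_assets",
--     "accumulated_depreciation",
--     "depreciation_and_amortization",
--     "gain_on_sale",
--     "ffo",
-- )
--
-- def infer_extension_type_from_extension(extension: Mapping[str, object]) -> str | None:
--     if any(key in extension for key in INDUSTRIAL_EXTENSION_KEYS):
--         return "Industrial"
--     if any(key in extension for key in FINANCIAL_SERVICES_EXTENSION_KEYS):
--         return "FinancialServices"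
--     if any(key in extension for key in REAL_ESTATE_EXTENSION_KEYS):
--         return "RealEstate"
--     return None
-- ===== SOURCE B (Python) =====
-- INDUSTRIAL_EXTENSION_KEYS = (
--     "inventory",
--     "accounts_receivable",
--     "cogs",
--     "rd_expense",
--     "sga_expense",
--     "selling_expense",
--     "ga_expense",
--     "capex",
-- )
--
-- FINANCIAL_SERVICES_EXTENSION_KEYS = (
--     "loans_and_leases",
--     "deposits",
--     "allowance_for_credit_losses",
--     "interest_income",
--     "interest_expense",
--     "provision_for_loan_losses",
--     "risk_weighted_assets",
--     "tier1_capital_ratio",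
-- )
--
-- REAL_ESTATE_EXTENSION_KEYS = (
--     "real_estate_assets",
--     "accumulated_depreciation",
--     "depreciation_and_amortization",
--     "gain_on_sale",
--     "ffo",
-- )
--
-- _NAMES = ("Industrial", "FinancialServices", "RealEstate")
--
-- _KEY_RANK = {}
-- for _rank, _keys in enumerate((INDUSTRIAL_EXTENSION_KEYS,
--                                FINANCIAL_SERVICES_EXTENSION_KEYS,
--                                REAL_ESTATE_EXTENSION_KEYS)):
--     for _k in _keys:
--         _KEY_RANK[_k] = _rank
--
--
-- def infer_extension_type_from_extension(extension):
--     best = None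
--     for key in extension:
--         r = _KEY_RANK.get(key)
--         if r is not None and (best is None or r < best):
--             best = r
--     return _NAMES[best] if best is not None else None
-- ===== Notes on version B (the rewrite author's own statement) =====
-- stated objective: idiomatic
-- what changed: Replaces three sequential any-scans of constant key tuples against the mapping by a single pass over the mapping's keys with a precomputed key->priority-rank dict, tracking the minimum rank seen.
import Mathlib
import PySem

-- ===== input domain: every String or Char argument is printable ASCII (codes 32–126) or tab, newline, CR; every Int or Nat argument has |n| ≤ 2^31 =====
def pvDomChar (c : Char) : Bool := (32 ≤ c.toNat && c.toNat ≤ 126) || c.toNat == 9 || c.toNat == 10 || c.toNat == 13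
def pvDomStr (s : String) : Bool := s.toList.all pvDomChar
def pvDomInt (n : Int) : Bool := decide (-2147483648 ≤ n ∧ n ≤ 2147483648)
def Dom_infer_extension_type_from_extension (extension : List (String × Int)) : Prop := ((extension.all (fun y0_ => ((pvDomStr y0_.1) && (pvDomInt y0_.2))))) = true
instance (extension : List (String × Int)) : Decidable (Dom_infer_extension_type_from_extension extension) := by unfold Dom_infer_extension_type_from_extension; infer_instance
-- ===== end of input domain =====

-- B replaces A's three sequential any-scans over constant key tuples by one pass over the
-- mapping's keys with a precomputed key→rank table tracking the minimum rank (idiomatic).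


-- ===== PORT A =====
def pvIndKeys : List String :=
  ["inventory", "accounts_receivable", "cogs", "rd_expense", "sga_expense",
   "selling_expense", "ga_expense", "capex"]

def pvFinKeys : List String :=
  ["loans_and_leases", "deposits", "allowance_for_credit_losses", "interest_income",
   "interest_expense", "provision_for_loan_losses", "risk_weighted_assets",
   "tier1_capital_ratio"]

def pvReKeys : List String :=
  ["real_estate_assets", "accumulated_depreciation", "depreciation_and_amortization",
   "gain_on_sale", "ffo"]

-- 'key in extension' for a mapping = membership among its keys
def infer_extension_type_from_extension (extension : List (String × Int)) : Option String :=
  if pvIndKeys.any (fun key => extension.any (fun p => p.1 == key)) then some "Industrial"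
  else if pvFinKeys.any (fun key => extension.any (fun p => p.1 == key)) then some "FinancialServices"
  else if pvReKeys.any (fun key => extension.any (fun p => p.1 == key)) then some "RealEstate"
  else none

-- ===== PORT B =====
-- the module-level dict _KEY_RANK (distinct keys; dict.get = first-match lookup)
def pvKeyRank : List (String × Int) :=
  [("inventory", 0), ("accounts_receivable", 0), ("cogs", 0), ("rd_expense", 0),
   ("sga_expense", 0), ("selling_expense", 0), ("ga_expense", 0), ("capex", 0),
   ("loans_and_leases", 1), ("deposits", 1), ("allowance_for_credit_losses", 1),
   ("interest_income", 1), ("interest_expense", 1), ("provision_for_loan_losses", 1),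
   ("risk_weighted_assets", 1), ("tier1_capital_ratio", 1),
   ("real_estate_assets", 2), ("accumulated_depreciation", 2),
   ("depreciation_and_amortization", 2), ("gain_on_sale", 2), ("ffo", 2)]

def pvNames : List String := ["Industrial", "FinancialServices", "RealEstate"]

def infer_extension_type_from_extension_alt (extension : List (String × Int)) : Option String :=
  let best := extension.foldl (fun b p =>
    match pvKeyRank.lookup p.1 with
    | none => b
    | some r => match b with
      | none => some r
      | some b' => if r < b' then some r else some b') none
  match best with
  | none => none
  | some r => PySem.List.pyGet? pvNames r

-- ===== PRECONDITION & SPEC =====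
def Spec_infer_extension_type_from_extension (extension : List (String × Int)) (out : Option String) : Prop := out = infer_extension_type_from_extension_alt extension
instance (extension : List (String × Int)) (out : Option String) : Decidable (Spec_infer_extension_type_from_extension extension out) := by unfold Spec_infer_extension_type_from_extension; infer_instance

-- ===== CLAIM (what is proved, stated in full; the proofs are below) =====
def Claim_equal_infer_extension_type_from_extension : Prop := ∀ (extension : List (String × Int)), Dom_infer_extension_type_from_extension extension → Spec_infer_extension_type_from_extension extension (infer_extension_type_from_extension extension)

-- ===== LEMMAS AND PROOFS =====

def pvOptMin : Option Int → Option Int → Option Int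
  | none, b => b
  | some a, none => some a
  | some a, some b => some (min a b)

def pvAnyRank (r : Int) (l : List (String × Int)) : Bool :=
  l.any (fun p => pvKeyRank.lookup p.1 == some r)

def pvM (l : List (String × Int)) : Option Int :=
  if pvAnyRank 0 l then some 0
  else if pvAnyRank 1 l then some 1
  else if pvAnyRank 2 l then some 2
  else none

theorem pvRank_cases (k : String) :
    pvKeyRank.lookup k = none ∨ pvKeyRank.lookup k = some 0 ∨
    pvKeyRank.lookup k = some 1 ∨ pvKeyRank.lookup k = some 2 := by
  simp only [pvKeyRank, List.lookup]
  repeat' split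
  all_goals simp

theorem pvRank_zero_iff (k : String) :
    pvKeyRank.lookup k = some 0 ↔ k ∈ pvIndKeys := by
  simp only [pvKeyRank, pvIndKeys, List.lookup]
  repeat' split
  all_goals simp_all
theorem pvRank_one_iff (k : String) :
    pvKeyRank.lookup k = some 1 ↔ k ∈ pvFinKeys := by
  simp only [pvKeyRank, pvFinKeys, List.lookup]
  repeat' split
  all_goals simp_all
theorem pvRank_two_iff (k : String) :
    pvKeyRank.lookup k = some 2 ↔ k ∈ pvReKeys := by
  simp only [pvKeyRank, pvReKeys, List.lookup]
  repeat' split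
  all_goals simp_all

theorem pvAny_swap (keys : List String) (l : List (String × Int)) :
    keys.any (fun key => l.any (fun p => p.1 == key)) =
    l.any (fun p => decide (p.1 ∈ keys)) := by
  rw [Bool.eq_iff_iff]
  simp only [List.any_eq_true, decide_eq_true_eq, beq_iff_eq]
  constructor
  · rintro ⟨key, hk, p, hp, rfl⟩; exact ⟨p, hp, hk⟩
  · rintro ⟨p, hp, hk⟩; exact ⟨p.1, hk, p, hp, rfl⟩

theorem pvAnyRank_eq_zero (l : List (String × Int)) :
    pvIndKeys.any (fun key => l.any (fun p => p.1 == key)) = pvAnyRank 0 l := by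
  rw [pvAny_swap]; unfold pvAnyRank
  congr 1; funext p
  rw [Bool.eq_iff_iff]
  simp only [decide_eq_true_eq, beq_iff_eq]
  exact (pvRank_zero_iff p.1).symm
theorem pvAnyRank_eq_one (l : List (String × Int)) :
    pvFinKeys.any (fun key => l.any (fun p => p.1 == key)) = pvAnyRank 1 l := by
  rw [pvAny_swap]; unfold pvAnyRank
  congr 1; funext p
  rw [Bool.eq_iff_iff]
  simp only [decide_eq_true_eq, beq_iff_eq]
  exact (pvRank_one_iff p.1).symm
theorem pvAnyRank_eq_two (l : List (String × Int)) :
    pvReKeys.any (fun key => l.any (fun p => p.1 == key)) = pvAnyRank 2 l := by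
  rw [pvAny_swap]; unfold pvAnyRank
  congr 1; funext p
  rw [Bool.eq_iff_iff]
  simp only [decide_eq_true_eq, beq_iff_eq]
  exact (pvRank_two_iff p.1).symm

theorem pvAnyRank_cons (r : Int) (p : String × Int) (l : List (String × Int)) :
    pvAnyRank r (p :: l) = ((pvKeyRank.lookup p.1 == some r) || pvAnyRank r l) := by
  simp [pvAnyRank]

theorem pvM_cons (p : String × Int) (l : List (String × Int)) :
    pvM (p :: l) = pvOptMin (pvKeyRank.lookup p.1) (pvM l) := by
  rcases pvRank_cases p.1 with h | h | h | h <;>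
    simp only [pvM, pvAnyRank_cons, h] <;>
    by_cases h0 : pvAnyRank 0 l <;>
    by_cases h1 : pvAnyRank 1 l <;>
    by_cases h2 : pvAnyRank 2 l <;>
    simp [h0, h1, h2, pvOptMin]

theorem pvStep_eq (b : Option Int) (p : String × Int) :
    (match pvKeyRank.lookup p.1 with
      | none => b
      | some r => match b with
        | none => some r
        | some b' => if r < b' then some r else some b') = pvOptMin b (pvKeyRank.lookup p.1) := by
  rcases pvRank_cases p.1 with h | h | h | h <;> rw [h] <;> rcases b with _ | b' <;>
    simp only [pvOptMin] <;> (try (split_ifs <;> simp only [Option.some.injEq] <;> omega))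

theorem pvOptMin_assoc (a b c : Option Int) :
    pvOptMin (pvOptMin a b) c = pvOptMin a (pvOptMin b c) := by
  rcases a with _ | a <;> rcases b with _ | b <;> rcases c with _ | c <;>
    simp [pvOptMin, min_assoc]

theorem pvFold_eq (l : List (String × Int)) : ∀ (b : Option Int),
    l.foldl (fun b p =>
      match pvKeyRank.lookup p.1 with
      | none => b
      | some r => match b with
        | none => some r
        | some b' => if r < b' then some r else some b') b = pvOptMin b (pvM l) := by
  induction l with
  | nil => intro b; rcases b with _ | b <;> simp [pvM, pvAnyRank, pvOptMin]
  | cons p l ih =>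
    intro b
    rw [List.foldl_cons, ih, pvStep_eq, pvM_cons, pvOptMin_assoc]

-- ===== VERDICT (by name: the statement is the Claim_ definition above) =====
theorem infer_extension_type_from_extension_spec : Claim_equal_infer_extension_type_from_extension := by
  intro l _
  unfold Spec_infer_extension_type_from_extension
  unfold infer_extension_type_from_extension infer_extension_type_from_extension_alt
  rw [pvFold_eq]
  rw [pvAnyRank_eq_zero, pvAnyRank_eq_one, pvAnyRank_eq_two]
  show _ = (match pvOptMin none (pvM l) with
    | none => none
    | some r => PySem.List.pyGet? pvNames r)
  unfold pvM
  rcases h0 : pvAnyRank 0 l with _ | _ <;>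
  rcases h1 : pvAnyRank 1 l with _ | _ <;>
  rcases h2 : pvAnyRank 2 l with _ | _ <;>
    simp [pvOptMin] <;> decide
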